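-- pv_equiv track=rewrite | github.com/Olixuta/TIPE-2025 | TIPE.py | retrouvemessageascii
-- ===== SOURCE A (Python) =====
-- def inverse_valeur_str(v: int,p:int):
--     """inverse de la fonction précédente
--
--     Args:
--         v (int): la valeur renvoyer par la dernière fonction
--         p (int): définir la taille de la chaine renvoyer (rajoute des 0 non significatif)
--
--     Returns:
--         str:
--     """
--     if v == 0:
--         return "0".ljust(p, "0")  # Retourne une chaîne de 14 zéros si v == 0
--
--     chaine = ""
--     while v > 0:
--         chaine += "1" if v % 2 == 1 else "0"
--         v //= 2
--
--     return chaine.ljust(p, "0")  # Complète avec des zéros à droite jusqu'à 14 caractères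
--
-- def retrouvemessageascii(l,p):
--     """reconstruction du message original
--
--     Args:
--         l (lst str): message bianire
--         p (int): taille des blocs
--
--     Returns:
--         str: message
--     """
--     nn=len(l)
--     n = p*nn
--     m=n//7
--     message_bin=''
--     message=''
--     ll=l.copy()
--     for i in range(nn):
--         ll[i]=inverse_valeur_str((ll[i]),p)
--         message_bin+=ll[i]
--     for i in range(m):
--         mm=''
--         if 7*i + 6 <n :
--             for j in range(7):
--                 mm+=message_bin[7*i+j]
--         message+=chr(int(mm,2))
--     mm=''.join([elt for elt in message if elt!='\x00' and elt!='\n' and elt!='\x0c' and elt!='\x05' and elt!='\x0b'])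
--     return mm
-- ===== SOURCE B (Python) =====
-- def retrouvemessageascii(l, p):
--     """Single streaming pass: feed each block's LSB-first bits into a bit buffer,
--     drain the available 7-bit big-endian chars (at most (p*len(l))//7 of them)
--     right after each block, filtering control chars on the fly."""
--     remaining = (p * len(l)) // 7      # number of 7-bit chars to decode
--     buf = []                           # pending bit chars, oldest first
--     res = []
--     for v in l:
--         k = 0
--         while v > 0:                   # emit v's bits, LSB first
--             buf.append('1' if v % 2 == 1 else '0')
--             v //= 2
--             k += 1
--         while k < p:                   # right-pad the block to p bits
--             buf.append('0')
--             k += 1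
--         i = 0                          # drain complete 7-bit chunks
--         while remaining > 0 and i + 7 <= len(buf):
--             c = 0
--             for ch in buf[i:i+7]:      # big-endian 7-bit value
--                 c = 2 * c + (1 if ch == '1' else 0)
--             i += 7
--             remaining -= 1
--             ch = chr(c)
--             if ch not in ('\x00', '\n', '\x0c', '\x05', '\x0b'):
--                 res.append(ch)
--         del buf[:i]
--     return ''.join(res)
-- ===== Notes on version B (the rewrite author's own statement) =====
-- stated objective: alternative
-- what changed: B replaces A's three-phase pipeline (build the whole bit string, then re-chunk it by absolute index into 7-bit chars, then filter) by a single streaming pass that feeds each block's LSB-first bits into a bounded buffer and drains one 7-bit big-endian char (filtered on the fly) as soon as enough bits are available, capped at floor(p*len(l)/7) chars.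
import Mathlib
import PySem

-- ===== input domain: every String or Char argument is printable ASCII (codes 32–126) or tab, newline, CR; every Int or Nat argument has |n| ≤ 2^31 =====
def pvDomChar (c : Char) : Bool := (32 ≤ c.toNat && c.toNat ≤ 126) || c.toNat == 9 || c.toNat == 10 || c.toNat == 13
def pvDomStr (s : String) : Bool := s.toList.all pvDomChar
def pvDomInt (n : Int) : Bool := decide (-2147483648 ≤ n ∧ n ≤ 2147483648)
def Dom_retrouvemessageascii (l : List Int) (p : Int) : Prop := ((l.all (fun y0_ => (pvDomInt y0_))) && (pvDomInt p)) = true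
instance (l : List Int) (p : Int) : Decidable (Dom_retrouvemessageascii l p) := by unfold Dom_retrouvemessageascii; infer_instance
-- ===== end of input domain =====

-- B re-implements the decoder as one streaming pass (bit buffer drained into chars on the fly)
-- instead of A's build-whole-bit-string-then-rechunk; same return value everywhere (equivalence
-- proved total, objective: alternative decomposition).

-- ===== PORT A =====

-- filter predicate of the final list comprehension (shared by both ports' transcriptions)
def goodChar (c : Char) : Bool :=
  c != '\x00' && c != '\n' && c != '\x0c' && c != '\x05' && c != '\x0b'

-- s.ljust(p, c)  (exact, incl. non-positive p: no padding)
def pvLjust (s : List Char) (p : Int) (c : Char) : List Char :=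
  s ++ List.replicate (p.toNat - s.length) c

-- the 'while v > 0' loop of inverse_valeur_str
def ivsLoop (v : Int) (chaine : List Char) : List Char :=
  if h : v > 0 then
    ivsLoop (PySem.Int.floordiv v 2)
      (chaine ++ [if PySem.Int.mod v 2 = 1 then '1' else '0'])
  else chaine
termination_by v.toNat
decreasing_by
  rw [PySem.Int.floordiv_eq_ediv_of_pos (by norm_num)]
  omega

def inverse_valeur_str (v : Int) (p : Int) : List Char :=
  if v = 0 then pvLjust ['0'] p '0'
  else pvLjust (ivsLoop v []) p '0'

-- int(mm, 2), big-endian (exact here: mm only ever holds '0'/'1' characters)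
def bitsVal (mm : List Char) : Int :=
  mm.foldl (fun a c => 2 * a + (if c = '1' then 1 else 0)) 0

-- Python's O(1) str indexing s[i], Array-backed; exact for the nonnegative
-- in-range indices this program uses (proved in range below; default unreachable)
def strGetD (a : Array Char) (i : Int) (d : Char) : Char :=
  if h : 0 ≤ i ∧ i.toNat < a.size then a[i.toNat] else d

def retrouvemessageascii (l : List Int) (p : Int) : String :=
  let nn : Int := l.length
  let n : Int := p * nn
  let m : Int := PySem.Int.floordiv n 7
  -- message_bin += … : Python str concatenation, Array-backed for O(1) amortized append
  let message_bin : Array Char :=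
    l.foldl (fun acc v => acc ++ (inverse_valeur_str v p).toArray) #[]
  let message : Array Char :=
    (PySem.List.pyRange 0 m 1).foldl (fun msg i =>
      let mm : List Char :=
        if 7 * i + 6 < n then
          (PySem.List.pyRange 0 7 1).foldl
            (fun mm j => mm ++ [strGetD message_bin (7 * i + j) '0']) []
        else []
      msg.push (Char.ofNat (bitsVal mm).toNat)) #[]
  String.mk (message.toList.filter goodChar)

-- ===== PORT B =====

-- 'while v > 0: buf.append(bit); v //= 2; k += 1'   (list.append = Array.push)
def emitLoopA (v : Int) (buf : Array Char) (k : Int) : Array Char × Int :=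
  if h : v > 0 then
    emitLoopA (PySem.Int.floordiv v 2)
      (buf.push (if PySem.Int.mod v 2 = 1 then '1' else '0')) (k + 1)
  else (buf, k)
termination_by v.toNat
decreasing_by
  rw [PySem.Int.floordiv_eq_ediv_of_pos (by norm_num)]
  omega

-- 'while k < p: buf.append('0'); k += 1'
def padLoopA (p : Int) (buf : Array Char) (k : Int) : Array Char :=
  if k < p then padLoopA p (buf.push '0') (k + 1) else buf
termination_by (p - k).toNat
decreasing_by omega

-- 'while remaining > 0 and i + 7 <= len(buf): …'  (buf[i:i+7] = Array.extract)
def drainLoopA (remaining : Int) (buf : Array Char) (i : Nat) (res : Array Char) :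
    Int × Nat × Array Char :=
  if h : 0 < remaining ∧ i + 7 ≤ buf.size then
    let ch : Char := Char.ofNat (bitsVal (buf.extract i (i + 7)).toList).toNat
    drainLoopA (remaining - 1) buf (i + 7)
      (if goodChar ch then res.push ch else res)
  else (remaining, i, res)
termination_by buf.size - i
decreasing_by omega

-- the body of B's 'for v in l' loop; 'del buf[:i]' = Array.extract to the end
def stepBA (p : Int) (st : Int × Array Char × Array Char) (v : Int) :
    Int × Array Char × Array Char :=
  let ek := emitLoopA v st.2.1 0
  let buf := padLoopA p ek.1 ek.2
  let dr := drainLoopA st.1 buf 0 st.2.2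
  (dr.1, buf.extract dr.2.1 buf.size, dr.2.2)

def retrouvemessageascii_alt (l : List Int) (p : Int) : String :=
  let st := l.foldl (stepBA p)
    (PySem.Int.floordiv (p * l.length) 7, (#[] : Array Char), (#[] : Array Char))
  String.mk st.2.2.toList

-- ===== PRECONDITION & SPEC =====
def Spec_retrouvemessageascii (l : List Int) (p : Int) (out : String) : Prop := out = retrouvemessageascii_alt l p
instance (l : List Int) (p : Int) (out : String) : Decidable (Spec_retrouvemessageascii l p out) := by unfold Spec_retrouvemessageascii; infer_instance

-- ===== CLAIM (what is proved, stated in full; the proofs are below) =====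
def Claim_equal_retrouvemessageascii : Prop := ∀ (l : List Int) (p : Int), Dom_retrouvemessageascii l p → Spec_retrouvemessageascii l p (retrouvemessageascii l p)

-- ===== LEMMAS AND PROOFS =====

-- List-level mirrors of B's loops (proof layer: the Array ports below are proved
-- equal to these, and these are related to port A)
def emitLoop (v : Int) (buf : List Char) (k : Int) : List Char × Int :=
  if h : v > 0 then
    emitLoop (PySem.Int.floordiv v 2)
      (buf ++ [if PySem.Int.mod v 2 = 1 then '1' else '0']) (k + 1)
  else (buf, k)
termination_by v.toNat
decreasing_by
  rw [PySem.Int.floordiv_eq_ediv_of_pos (by norm_num)]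
  omega

def padLoop (p : Int) (buf : List Char) (k : Int) : List Char :=
  if k < p then padLoop p (buf ++ ['0']) (k + 1) else buf
termination_by (p - k).toNat
decreasing_by omega

def drainLoop (remaining : Int) (buf : List Char) (res : List Char) :
    Int × List Char × List Char :=
  if h : 0 < remaining ∧ 7 ≤ buf.length then
    let ch : Char := Char.ofNat (bitsVal (buf.take 7)).toNat
    drainLoop (remaining - 1) (buf.drop 7)
      (if goodChar ch then res ++ [ch] else res)
  else (remaining, buf, res)
termination_by buf.length
decreasing_by simp; omega

def stepB (p : Int) (st : Int × List Char × List Char) (v : Int) :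
    Int × List Char × List Char :=
  let ek := emitLoop v st.2.1 0
  let buf := padLoop p ek.1 ek.2
  drainLoop st.1 buf st.2.2


-- B's per-block contribution to the bit stream
def bbits (v : Int) (p : Int) : List Char :=
  ivsLoop v [] ++ List.replicate (p - (ivsLoop v []).length).toNat '0'

-- the chars produced by decoding M 7-bit chunks from the front of a stream
def decA : Nat → List Char → List Char
  | 0, _ => []
  | M + 1, s => Char.ofNat (bitsVal (s.take 7)).toNat :: decA M (s.drop 7)

lemma fd2_toNat_lt (v : Int) (h : 0 < v) :
    (PySem.Int.floordiv v 2).toNat < v.toNat := by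
  rw [PySem.Int.floordiv_eq_ediv_of_pos (by norm_num)]; omega

lemma ivsLoop_pos (v : Int) (ch : List Char) (h : 0 < v) :
    ivsLoop v ch = ivsLoop (PySem.Int.floordiv v 2)
      (ch ++ [if PySem.Int.mod v 2 = 1 then '1' else '0']) := by
  conv_lhs => rw [ivsLoop]
  rw [dif_pos h]

lemma ivsLoop_neg (v : Int) (ch : List Char) (h : ¬ 0 < v) :
    ivsLoop v ch = ch := by
  conv_lhs => rw [ivsLoop]
  rw [dif_neg h]

lemma emitLoop_pos (v : Int) (buf : List Char) (k : Int) (h : 0 < v) :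
    emitLoop v buf k = emitLoop (PySem.Int.floordiv v 2)
      (buf ++ [if PySem.Int.mod v 2 = 1 then '1' else '0']) (k + 1) := by
  conv_lhs => rw [emitLoop]
  rw [dif_pos h]

lemma emitLoop_neg (v : Int) (buf : List Char) (k : Int) (h : ¬ 0 < v) :
    emitLoop v buf k = (buf, k) := by
  conv_lhs => rw [emitLoop]
  rw [dif_neg h]

lemma padLoop_pos (p : Int) (buf : List Char) (k : Int) (h : k < p) :
    padLoop p buf k = padLoop p (buf ++ ['0']) (k + 1) := by
  conv_lhs => rw [padLoop]
  rw [if_pos h]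

lemma padLoop_neg (p : Int) (buf : List Char) (k : Int) (h : ¬ k < p) :
    padLoop p buf k = buf := by
  conv_lhs => rw [padLoop]
  rw [if_neg h]

lemma drainLoop_pos (r : Int) (buf res : List Char) (h : 0 < r ∧ 7 ≤ buf.length) :
    drainLoop r buf res = drainLoop (r - 1) (buf.drop 7)
      (if goodChar (Char.ofNat (bitsVal (buf.take 7)).toNat) then
        res ++ [Char.ofNat (bitsVal (buf.take 7)).toNat] else res) := by
  conv_lhs => rw [drainLoop]
  rw [dif_pos h]

lemma drain_fix (r : Int) (buf res : List Char) (h : ¬ (0 < r ∧ 7 ≤ buf.length)) :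
    drainLoop r buf res = (r, buf, res) := by
  conv_lhs => rw [drainLoop]
  rw [dif_neg h]

lemma ivsLoop_append (v : Int) (ch : List Char) :
    ivsLoop v ch = ch ++ ivsLoop v [] := by
  have key : ∀ (fuel : Nat) (v : Int), v.toNat ≤ fuel →
      ∀ ch, ivsLoop v ch = ch ++ ivsLoop v [] := by
    intro fuel
    induction fuel with
    | zero =>
      intro v hv ch
      rw [ivsLoop_neg v ch (by omega), ivsLoop_neg v [] (by omega)]
      simp
    | succ fu ih =>
      intro v hv ch
      by_cases h : 0 < v
      · rw [ivsLoop_pos v ch h, ivsLoop_pos v [] h]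
        have hle : (PySem.Int.floordiv v 2).toNat ≤ fu := by
          have := fd2_toNat_lt v h; omega
        rw [ih _ hle, ih _ hle ([] ++ _)]
        simp
      · rw [ivsLoop_neg v ch h, ivsLoop_neg v [] h]
        simp
  exact key v.toNat v le_rfl ch

lemma emitLoop_eq (v : Int) (buf : List Char) (k : Int) :
    emitLoop v buf k = (buf ++ ivsLoop v [], k + (ivsLoop v []).length) := by
  have key : ∀ (fuel : Nat) (v : Int), v.toNat ≤ fuel →
      ∀ buf k, emitLoop v buf k = (buf ++ ivsLoop v [], k + (ivsLoop v []).length) := by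
    intro fuel
    induction fuel with
    | zero =>
      intro v hv buf k
      rw [emitLoop_neg v buf k (by omega), ivsLoop_neg v [] (by omega)]
      simp
    | succ fu ih =>
      intro v hv buf k
      by_cases h : 0 < v
      · rw [emitLoop_pos v buf k h]
        have hle : (PySem.Int.floordiv v 2).toNat ≤ fu := by
          have := fd2_toNat_lt v h; omega
        rw [ih _ hle]
        rw [ivsLoop_pos v [] h,
            ivsLoop_append (PySem.Int.floordiv v 2)
              ([] ++ [if PySem.Int.mod v 2 = 1 then '1' else '0'])]
        rw [Prod.mk.injEq]
        constructor
        · simp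
        · simp only [List.nil_append, List.singleton_append, List.length_cons]
          push_cast
          omega
      · rw [emitLoop_neg v buf k h, ivsLoop_neg v [] h]
        simp
  exact key v.toNat v le_rfl buf k

lemma padLoop_eq (p : Int) (buf : List Char) (k : Int) :
    padLoop p buf k = buf ++ List.replicate (p - k).toNat '0' := by
  have key : ∀ (fuel : Nat) (k : Int), (p - k).toNat ≤ fuel →
      ∀ buf, padLoop p buf k = buf ++ List.replicate (p - k).toNat '0' := by
    intro fuel
    induction fuel with
    | zero =>
      intro k hv buf
      rw [padLoop_neg p buf k (by omega)]
      have h0 : (p - k).toNat = 0 := by omega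
      simp [h0]
    | succ fu ih =>
      intro k hv buf
      by_cases h : k < p
      · rw [padLoop_pos p buf k h]
        rw [ih (k + 1) (by omega)]
        have h1 : (p - k).toNat = (p - (k + 1)).toNat + 1 := by omega
        rw [h1, List.replicate_succ]
        simp
      · rw [padLoop_neg p buf k h]
        have h0 : (p - k).toNat = 0 := by omega
        simp [h0]
  exact key (p - k).toNat k le_rfl buf

lemma stepB_eq (p : Int) (st : Int × List Char × List Char) (v : Int) :
    stepB p st v = drainLoop st.1 (st.2.1 ++ bbits v p) st.2.2 := by
  simp only [stepB, emitLoop_eq, padLoop_eq, bbits, zero_add, List.append_assoc]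

lemma drain_post (r : Int) (buf res : List Char) :
    ¬ (0 < (drainLoop r buf res).1 ∧ 7 ≤ (drainLoop r buf res).2.1.length) := by
  have key : ∀ (fuel : Nat) (buf : List Char), buf.length ≤ fuel → ∀ r res,
      ¬ (0 < (drainLoop r buf res).1 ∧ 7 ≤ (drainLoop r buf res).2.1.length) := by
    intro fuel
    induction fuel with
    | zero =>
      intro buf hb r res
      rw [drain_fix _ _ _ (by omega)]
      simp
      omega
    | succ fu ih =>
      intro buf hb r res
      by_cases h : 0 < r ∧ 7 ≤ buf.length
      · rw [drainLoop_pos _ _ _ h]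
        exact ih (buf.drop 7) (by simp; omega) _ _
      · rw [drain_fix _ _ _ h]
        exact h
  exact key buf.length buf le_rfl r res

lemma drain_defer (r : Int) (buf res e : List Char) :
    drainLoop r (buf ++ e) res =
      drainLoop (drainLoop r buf res).1 ((drainLoop r buf res).2.1 ++ e)
        (drainLoop r buf res).2.2 := by
  have key : ∀ (fuel : Nat) (buf : List Char), buf.length ≤ fuel → ∀ r res e,
      drainLoop r (buf ++ e) res =
        drainLoop (drainLoop r buf res).1 ((drainLoop r buf res).2.1 ++ e)
          (drainLoop r buf res).2.2 := by
    intro fuel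
    induction fuel with
    | zero =>
      intro buf hb r res e
      rw [drain_fix r buf res (by omega)]
    | succ fu ih =>
      intro buf hb r res e
      by_cases h : 0 < r ∧ 7 ≤ buf.length
      · have htake : (buf ++ e).take 7 = buf.take 7 :=
          List.take_append_of_le_length h.2
        have hdrop : (buf ++ e).drop 7 = buf.drop 7 ++ e :=
          List.drop_append_of_le_length h.2
        rw [drainLoop_pos r (buf ++ e) res ⟨h.1, by simp; omega⟩]
        rw [htake, hdrop]
        rw [ih (buf.drop 7) (by simp; omega)]
        rw [drainLoop_pos r buf res h]
      · rw [drain_fix r buf res h]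
  exact key buf.length buf le_rfl r res e

lemma foldB (p : Int) (l : List Int) (r : Int) (buf res : List Char)
    (h : ¬ (0 < r ∧ 7 ≤ buf.length)) :
    l.foldl (stepB p) (r, buf, res)
      = drainLoop r (buf ++ l.flatMap (fun v => bbits v p)) res := by
  induction l generalizing r buf res with
  | nil => simp [drain_fix r buf res h]
  | cons v t ih =>
    simp only [List.foldl_cons, List.flatMap_cons]
    rw [stepB_eq]
    have hres : drainLoop r (buf ++ bbits v p) res
        = ((drainLoop r (buf ++ bbits v p) res).1,
           (drainLoop r (buf ++ bbits v p) res).2.1,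
           (drainLoop r (buf ++ bbits v p) res).2.2) := rfl
    rw [hres, ih _ _ _ (drain_post r (buf ++ bbits v p) res)]
    rw [← drain_defer]
    rw [List.append_assoc]

lemma blockBits (v : Int) (p : Int) (hp : 1 ≤ p) :
    bbits v p = inverse_valeur_str v p := by
  unfold bbits inverse_valeur_str
  by_cases h : v = 0
  · subst h
    rw [ivsLoop_neg 0 [] (by omega), if_pos rfl]
    unfold pvLjust
    simp only [List.nil_append, List.length_nil, List.length_cons, Nat.cast_zero, sub_zero]
    have h1 : p.toNat = (p.toNat - 1) + 1 := by omega
    rw [h1, List.replicate_succ]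
    simp
  · rw [if_neg h]
    unfold pvLjust
    congr 1
    congr 1
    omega

lemma drain_spec (M : Nat) : ∀ (s res : List Char), 7 * M ≤ s.length →
    (drainLoop (M : Int) s res).2.2 = res ++ (decA M s).filter goodChar := by
  induction M with
  | zero =>
    intro s res hlen
    rw [drain_fix _ _ _ (by simp)]
    simp [decA]
  | succ M ih =>
    intro s res hlen
    rw [drainLoop_pos _ _ _ (by constructor <;> [exact_mod_cast Nat.succ_pos M; omega])]
    have hcast : ((M + 1 : Nat) : Int) - 1 = (M : Int) := by push_cast; ring
    rw [hcast]
    rw [ih (s.drop 7) _ (by simp; omega)]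
    simp only [decA, List.filter_cons]
    by_cases hg : goodChar (Char.ofNat (bitsVal (s.take 7)).toNat) = true
    · simp [hg]
    · simp [hg]

lemma chunk_eq (s : List Char) (k : Int) (h0 : 0 ≤ k) (h : k + 7 ≤ (s.length : Int)) :
    (PySem.List.pyRange 0 7 1).map (fun j => PySem.List.pyGetD s (k + j) '0')
      = (s.drop k.toNat).take 7 := by
  apply List.ext_getElem
  · simp only [List.length_map, PySem.List.length_pyRange_one, List.length_take,
      List.length_drop]
    omega
  · intro i hi1 hi2
    simp only [List.getElem_map, PySem.List.getElem_pyRange_one]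
    have hi7 : i < 7 := by
      simpa [PySem.List.length_pyRange_one] using hi1
    have hb1 : (0:Int) ≤ k + (0 + (i:Int)) := by omega
    have hb2 : k + (0 + (i:Int)) < (s.length:Int) := by omega
    rw [PySem.List.pyGetD_eq_getElem s '0' hb1 hb2]
    rw [List.getElem_take, List.getElem_drop]
    congr 1
    omega

lemma blk_len (v : Int) (p : Int) (hp : 1 ≤ p) :
    p.toNat ≤ (inverse_valeur_str v p).length := by
  unfold inverse_valeur_str pvLjust
  by_cases h : v = 0 <;> simp [h] <;> omega

lemma sum_ge (c : Nat) (f : Int → Nat) (l : List Int) (h : ∀ x ∈ l, c ≤ f x) :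
    c * l.length ≤ (l.map f).sum := by
  induction l with
  | nil => simp
  | cons x t ih =>
    simp only [List.map_cons, List.sum_cons, List.length_cons]
    have hx := h x (by simp)
    have ht := ih (fun y hy => h y (by simp [hy]))
    calc c * (t.length + 1) = c * t.length + c := by ring
    _ ≤ (t.map f).sum + f x := by omega
    _ = f x + (t.map f).sum := by ring

lemma map_chunk_eq_dec (M : Nat) : ∀ (s : List Char), 7 * M ≤ s.length →
    (List.range M).map (fun i => Char.ofNat (bitsVal ((s.drop (7*i)).take 7)).toNat)
      = decA M s := by
  induction M with
  | zero => intro s hlen; simp [decA]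
  | succ M ih =>
    intro s hlen
    unfold decA
    simp only [List.range_succ_eq_map, List.map_cons, List.map_map, mul_zero, List.drop_zero]
    congr 1
    rw [← ih (s.drop 7) (by simp; omega)]
    apply List.map_congr_left
    intro i _
    simp only [Function.comp]
    have h1 : (s.drop 7).drop (7*i) = s.drop (7 * (i+1)) := by
      rw [List.drop_drop]; congr 1; omega
    rw [h1]

-- ===== Array ↔ List couplings (the Array ports compute the List-level mirrors) =====

lemma emitLoopA_pos (v : Int) (buf : Array Char) (k : Int) (h : 0 < v) :
    emitLoopA v buf k = emitLoopA (PySem.Int.floordiv v 2)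
      (buf.push (if PySem.Int.mod v 2 = 1 then '1' else '0')) (k + 1) := by
  conv_lhs => rw [emitLoopA]
  rw [dif_pos h]

lemma emitLoopA_neg (v : Int) (buf : Array Char) (k : Int) (h : ¬ 0 < v) :
    emitLoopA v buf k = (buf, k) := by
  conv_lhs => rw [emitLoopA]
  rw [dif_neg h]

lemma padLoopA_pos (p : Int) (buf : Array Char) (k : Int) (h : k < p) :
    padLoopA p buf k = padLoopA p (buf.push '0') (k + 1) := by
  conv_lhs => rw [padLoopA]
  rw [if_pos h]

lemma padLoopA_neg (p : Int) (buf : Array Char) (k : Int) (h : ¬ k < p) :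
    padLoopA p buf k = buf := by
  conv_lhs => rw [padLoopA]
  rw [if_neg h]

lemma drainLoopA_pos (r : Int) (buf : Array Char) (i : Nat) (res : Array Char)
    (h : 0 < r ∧ i + 7 ≤ buf.size) :
    drainLoopA r buf i res = drainLoopA (r - 1) buf (i + 7)
      (if goodChar (Char.ofNat (bitsVal (buf.extract i (i + 7)).toList).toNat) then
        res.push (Char.ofNat (bitsVal (buf.extract i (i + 7)).toList).toNat) else res) := by
  conv_lhs => rw [drainLoopA]
  rw [dif_pos h]

lemma drainLoopA_neg (r : Int) (buf : Array Char) (i : Nat) (res : Array Char)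
    (h : ¬ (0 < r ∧ i + 7 ≤ buf.size)) :
    drainLoopA r buf i res = (r, i, res) := by
  conv_lhs => rw [drainLoopA]
  rw [dif_neg h]

lemma emitLoopA_couple (v : Int) (buf : Array Char) (k : Int) :
    ((emitLoopA v buf k).1.toList, (emitLoopA v buf k).2) = emitLoop v buf.toList k := by
  have key : ∀ (fuel : Nat) (v : Int), v.toNat ≤ fuel → ∀ (buf : Array Char) (k : Int),
      ((emitLoopA v buf k).1.toList, (emitLoopA v buf k).2) = emitLoop v buf.toList k := by
    intro fuel
    induction fuel with
    | zero =>
      intro v hv buf k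
      rw [emitLoopA_neg v buf k (by omega), emitLoop_neg v buf.toList k (by omega)]
    | succ fu ih =>
      intro v hv buf k
      by_cases h : 0 < v
      · rw [emitLoopA_pos v buf k h, emitLoop_pos v buf.toList k h]
        have hle : (PySem.Int.floordiv v 2).toNat ≤ fu := by
          have := fd2_toNat_lt v h; omega
        rw [ih _ hle, Array.toList_push]
      · rw [emitLoopA_neg v buf k h, emitLoop_neg v buf.toList k h]
  exact key v.toNat v le_rfl buf k

lemma padLoopA_couple (p : Int) (buf : Array Char) (k : Int) :
    (padLoopA p buf k).toList = padLoop p buf.toList k := by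
  have key : ∀ (fuel : Nat) (k : Int), (p - k).toNat ≤ fuel → ∀ (buf : Array Char),
      (padLoopA p buf k).toList = padLoop p buf.toList k := by
    intro fuel
    induction fuel with
    | zero =>
      intro k hv buf
      rw [padLoopA_neg p buf k (by omega), padLoop_neg p buf.toList k (by omega)]
    | succ fu ih =>
      intro k hv buf
      by_cases h : k < p
      · rw [padLoopA_pos p buf k h, padLoop_pos p buf.toList k h]
        rw [ih (k + 1) (by omega), Array.toList_push]
      · rw [padLoopA_neg p buf k h, padLoop_neg p buf.toList k h]
  exact key (p - k).toNat k le_rfl buf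

lemma drainLoopA_couple (r : Int) (buf : Array Char) (i : Nat) (res : Array Char)
    (hi : i ≤ buf.size) :
    (drainLoopA r buf i res).1 = (drainLoop r (buf.toList.drop i) res.toList).1
    ∧ (drainLoopA r buf i res).2.1 ≤ buf.size
    ∧ buf.toList.drop (drainLoopA r buf i res).2.1
        = (drainLoop r (buf.toList.drop i) res.toList).2.1
    ∧ (drainLoopA r buf i res).2.2.toList
        = (drainLoop r (buf.toList.drop i) res.toList).2.2 := by
  have key : ∀ (fuel : Nat) (i : Nat), buf.size - i ≤ fuel → i ≤ buf.size →
      ∀ (r : Int) (res : Array Char),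
      (drainLoopA r buf i res).1 = (drainLoop r (buf.toList.drop i) res.toList).1
      ∧ (drainLoopA r buf i res).2.1 ≤ buf.size
      ∧ buf.toList.drop (drainLoopA r buf i res).2.1
          = (drainLoop r (buf.toList.drop i) res.toList).2.1
      ∧ (drainLoopA r buf i res).2.2.toList
          = (drainLoop r (buf.toList.drop i) res.toList).2.2 := by
    intro fuel
    induction fuel with
    | zero =>
      intro i hf hi r res
      rw [drainLoopA_neg _ _ _ _ (by omega),
        drain_fix _ _ _ (by rw [not_and]; intro _; simp; omega)]
      exact ⟨rfl, hi, rfl, rfl⟩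
    | succ fu ih =>
      intro i hf hi r res
      by_cases h : 0 < r ∧ i + 7 ≤ buf.size
      · have h7 : i + 7 - i = 7 := by omega
        have hext : (buf.extract i (i + 7)).toList = (buf.toList.drop i).take 7 := by
          rw [Array.toList_extract, List.extract_eq_take_drop, h7]
        rw [drainLoopA_pos _ _ _ _ h,
          drainLoop_pos _ _ _ ⟨h.1, by simp; omega⟩, hext]
        set ch := Char.ofNat (bitsVal ((buf.toList.drop i).take 7)).toNat with hch
        have hstep := ih (i + 7) (by omega) (by omega) (r - 1)
          (if goodChar ch then res.push ch else res)
        have hdd : buf.toList.drop (i + 7) = (buf.toList.drop i).drop 7 := by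
          rw [List.drop_drop]
        have hres : (if goodChar ch then res.push ch else res).toList
            = if goodChar ch then res.toList ++ [ch] else res.toList := by
          by_cases hg : goodChar ch = true
          · rw [if_pos hg, if_pos hg, Array.toList_push]
          · rw [if_neg hg, if_neg hg]
        rw [hdd, hres] at hstep
        exact hstep
      · rw [drainLoopA_neg _ _ _ _ h,
          drain_fix _ _ _ (by rw [not_and]; intro hr; simp; omega)]
        exact ⟨rfl, hi, rfl, rfl⟩
  exact key (buf.size - i) i le_rfl hi r res

lemma stepBA_couple (p : Int) (st : Int × Array Char × Array Char) (v : Int) :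
    ((stepBA p st v).1, (stepBA p st v).2.1.toList, (stepBA p st v).2.2.toList)
      = stepB p (st.1, st.2.1.toList, st.2.2.toList) v := by
  have he := emitLoopA_couple v st.2.1 0
  have hbuf : (padLoopA p (emitLoopA v st.2.1 0).1 (emitLoopA v st.2.1 0).2).toList
      = padLoop p (emitLoop v st.2.1.toList 0).1 (emitLoop v st.2.1.toList 0).2 := by
    rw [padLoopA_couple, ← he]
  obtain ⟨h1, h2, h3, h4⟩ := drainLoopA_couple st.1
    (padLoopA p (emitLoopA v st.2.1 0).1 (emitLoopA v st.2.1 0).2) 0 st.2.2 (Nat.zero_le _)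
  rw [List.drop_zero, hbuf] at h1 h3 h4
  show ((drainLoopA st.1 (padLoopA p (emitLoopA v st.2.1 0).1 (emitLoopA v st.2.1 0).2) 0 st.2.2).1,
        ((padLoopA p (emitLoopA v st.2.1 0).1 (emitLoopA v st.2.1 0).2).extract
          (drainLoopA st.1 (padLoopA p (emitLoopA v st.2.1 0).1 (emitLoopA v st.2.1 0).2) 0 st.2.2).2.1
          (padLoopA p (emitLoopA v st.2.1 0).1 (emitLoopA v st.2.1 0).2).size).toList,
        (drainLoopA st.1 (padLoopA p (emitLoopA v st.2.1 0).1 (emitLoopA v st.2.1 0).2) 0 st.2.2).2.2.toList)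
      = drainLoop st.1 (padLoop p (emitLoop v st.2.1.toList 0).1 (emitLoop v st.2.1.toList 0).2) st.2.2.toList
  refine Prod.ext h1 (Prod.ext ?_ h4)
  rw [Array.toList_extract, hbuf, List.extract_eq_take_drop]
  have hn7 : (padLoopA p (emitLoopA v st.2.1 0).1 (emitLoopA v st.2.1 0).2).size
      - (drainLoopA st.1 (padLoopA p (emitLoopA v st.2.1 0).1 (emitLoopA v st.2.1 0).2) 0 st.2.2).2.1
      = ((padLoop p (emitLoop v st.2.1.toList 0).1 (emitLoop v st.2.1.toList 0).2).drop
          (drainLoopA st.1 (padLoopA p (emitLoopA v st.2.1 0).1 (emitLoopA v st.2.1 0).2) 0 st.2.2).2.1).length := by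
    rw [List.length_drop, ← hbuf, Array.length_toList]
  rw [hn7, List.take_length]
  exact h3

lemma foldBA_couple (p : Int) (l : List Int) :
    ∀ (r : Int) (bufA resA : Array Char),
      ((l.foldl (stepBA p) (r, bufA, resA)).1,
       (l.foldl (stepBA p) (r, bufA, resA)).2.1.toList,
       (l.foldl (stepBA p) (r, bufA, resA)).2.2.toList)
        = l.foldl (stepB p) (r, bufA.toList, resA.toList) := by
  induction l with
  | nil => intro r bufA resA; rfl
  | cons v t ih =>
    intro r bufA resA
    simp only [List.foldl_cons]
    rw [ih (stepBA p (r, bufA, resA) v).1 (stepBA p (r, bufA, resA) v).2.1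
      (stepBA p (r, bufA, resA) v).2.2]
    rw [stepBA_couple p (r, bufA, resA) v]

-- ===== closed forms and the main equivalence =====

lemma foldA_toList (p : Int) (l : List Int) :
    ∀ (acc : Array Char),
      (l.foldl (fun acc v => acc ++ (inverse_valeur_str v p).toArray) acc).toList
        = l.foldl (fun acc v => acc ++ inverse_valeur_str v p) acc.toList := by
  induction l with
  | nil => intro acc; rfl
  | cons v t ih =>
    intro acc
    simp only [List.foldl_cons]
    rw [ih, Array.toList_append]

lemma foldl_push_toList (xs : List Int) (f : Int → Char) :
    ∀ (acc : Array Char),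
      (xs.foldl (fun a i => a.push (f i)) acc).toList = acc.toList ++ xs.map f := by
  induction xs with
  | nil => intro acc; simp
  | cons x t ih =>
    intro acc
    simp only [List.foldl_cons, List.map_cons]
    rw [ih, Array.toList_push]
    simp

lemma strGetD_eq_pyGetD (a : Array Char) (i : Int) (d : Char)
    (h0 : 0 ≤ i) (h1 : i < (a.toList.length : Int)) :
    strGetD a i d = PySem.List.pyGetD a.toList i d := by
  rw [strGetD, dif_pos ⟨h0, by rw [← Array.length_toList]; omega⟩,
    PySem.List.pyGetD_eq_getElem a.toList d h0 h1]
  exact (Array.getElem_toList _).symm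

lemma A_closed (l : List Int) (p : Int) :
    retrouvemessageascii l p = String.mk
      (((PySem.List.pyRange 0 (PySem.Int.floordiv (p * (l.length : Int)) 7) 1).foldl
        (fun msg i =>
          msg.push (Char.ofNat (bitsVal
            (if 7 * i + 6 < p * (l.length : Int) then
              (PySem.List.pyRange 0 7 1).foldl
                (fun mm j => mm ++ [strGetD
                  (l.foldl (fun acc v => acc ++ (inverse_valeur_str v p).toArray) #[])
                  (7 * i + j) '0']) []
            else [])).toNat))
        #[]).toList.filter goodChar) := rfl

lemma B_closed (l : List Int) (p : Int) :
    retrouvemessageascii_alt l p = String.mk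
      ((l.foldl (stepBA p)
        (PySem.Int.floordiv (p * (l.length : Int)) 7,
          (#[] : Array Char), (#[] : Array Char))).2.2.toList) := rfl

-- ===== VERDICT (by name: the statement is the Claim_ definition above) =====
theorem retrouvemessageascii_spec : Claim_equal_retrouvemessageascii := by
  intro l p _
  unfold Spec_retrouvemessageascii
  rw [A_closed, B_closed]
  set nn : Int := (l.length : Int) with hnn
  set n : Int := p * nn with hn
  set m : Int := PySem.Int.floordiv n 7 with hm
  have hdm := PySem.Int.floordiv_mul_add_mod n 7
  rw [← hm] at hdm
  have hmod0 : 0 ≤ PySem.Int.mod n 7 := PySem.Int.mod_nonneg n (by norm_num)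
  have hmod7 : PySem.Int.mod n 7 < 7 := PySem.Int.mod_lt n (by norm_num)
  have hnn0 : 0 ≤ nn := by rw [hnn]; exact Int.natCast_nonneg _
  have hB := congrArg (fun x : Int × List Char × List Char => x.2.2)
    (foldBA_couple p l m #[] #[])
  simp only at hB
  rw [hB]
  rw [foldB p l m [] [] (by simp)]
  by_cases hp : p ≤ 0
  · have hn0 : n ≤ 0 := by rw [hn]; exact mul_nonpos_of_nonpos_of_nonneg hp hnn0
    have hm0 : ¬ 0 < m := by omega
    rw [drain_fix _ _ _ (by simp [hm0])]
    rw [PySem.List.pyRange_one_eq_nil (a := 0) (b := m) (by omega)]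
    simp
  · push_neg at hp
    have hp1 : 1 ≤ p := hp
    have hfun : (fun v => bbits v p) = (fun v => inverse_valeur_str v p) :=
      funext (fun v => blockBits v p hp1)
    rw [hfun]
    simp only [List.nil_append]
    set S : List Char := l.flatMap (fun v => inverse_valeur_str v p) with hS
    set SA : Array Char :=
      l.foldl (fun acc v => acc ++ (inverse_valeur_str v p).toArray) #[] with hSAdef
    have hSA : SA.toList = S := by
      rw [hSAdef, foldA_toList p l #[]]
      rw [PySem.List.foldl_append_eq_flatMap, hS]
      simp
    have hn0 : 0 ≤ n := by rw [hn]; exact mul_nonneg (by omega) hnn0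
    have hm0 : 0 ≤ m := by omega
    set M : Nat := m.toNat with hM
    have hmM : (M : Int) = m := Int.toNat_of_nonneg hm0
    have hpc : ((p.toNat : Int)) = p := Int.toNat_of_nonneg (by omega)
    have hplen : n = ((p.toNat * l.length : Nat) : Int) := by
      rw [hn, hnn]
      push_cast
      rw [hpc]
    have hlenS : p.toNat * l.length ≤ S.length := by
      rw [hS, List.length_flatMap]
      exact sum_ge p.toNat _ l (fun x _ => blk_len x p hp1)
    have h7M : 7 * M ≤ S.length := by omega
    rw [← hmM]
    rw [drain_spec M S [] h7M]
    rw [foldl_push_toList _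
      (fun i => Char.ofNat (bitsVal (
        if 7 * i + 6 < n then
          (PySem.List.pyRange 0 7 1).foldl
            (fun mm j => mm ++ [strGetD SA (7 * i + j) '0']) []
        else [])).toNat) #[]]
    rw [PySem.List.pyRange_one 0 (M : Int)]
    simp only [sub_zero, Int.toNat_natCast, zero_add, List.nil_append, List.map_map]
    have hnge : 7 * (M : Int) ≤ n := by omega
    have hbig : (List.range M).map ((fun i => Char.ofNat (bitsVal (
          if 7 * i + 6 < n then
            (PySem.List.pyRange 0 7 1).foldl
              (fun mm j => mm ++ [strGetD SA (7 * i + j) '0']) []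
          else [])).toNat) ∘ (fun (k : Nat) => (k : Int)))
        = decA M S := by
      rw [← map_chunk_eq_dec M S h7M]
      apply List.map_congr_left
      intro iN hiN
      rw [List.mem_range] at hiN
      simp only [Function.comp]
      rw [if_pos (by omega)]
      rw [PySem.List.foldl_append_singleton_eq_map]
      simp only [List.nil_append]
      have hmm : (PySem.List.pyRange 0 7 1).map
            (fun j => strGetD SA (7 * (iN : Int) + j) '0')
          = (PySem.List.pyRange 0 7 1).map
            (fun j => PySem.List.pyGetD S (7 * (iN : Int) + j) '0') := by
        apply List.map_congr_left
        intro j hj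
        rw [PySem.List.mem_pyRange_one] at hj
        rw [strGetD_eq_pyGetD SA _ '0' (by omega) (by rw [hSA]; push_cast; omega), hSA]
      rw [hmm, chunk_eq S (7 * (iN : Int)) (by omega) (by omega)]
      have hidx : (7 * (iN : Int)).toNat = 7 * iN := by omega
      rw [hidx]
    rw [hbig]
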